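-- pv_equiv track=rewrite | github.com/ThomasKarpinski/Matura | matura2008_PR_Python/zad2_słowa.py | REG_3
-- ===== SOURCE A (Python) =====
-- def REG_3(w):
--     n = len(w)
--     if n == 1:
--         return True
--     if n > 1 and n % 3 != 0:
--         return False
--     if n > 1 and n % 3 == 0:
--         w1 = w[0:(n // 3)]
--         w2 = w[(n // 3):((n // 3) + 3)]
--         w3 = w[(n // 3):-1]
--         if w1 not in w3 and w1 not in w2:
--             return False
--         return REG_3(w1)
-- ===== SOURCE B (Python) =====
-- def REG_3(w):
--     n = len(w)
--     if n == 0: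
--         return None
--     # n must reduce to 1 by dividing by 3, i.e. be a power of 3, to ever accept
--     m = n
--     while m % 3 == 0:
--         m //= 3
--     if m != 1:
--         return False
--     # check every level against the original string: the prefix of length k
--     # must occur in w[k:3*k-1] or in w[k:k+3] (clipped to the current level)
--     k = n // 3
--     while k >= 1:
--         pre = w[:k]
--         if pre not in w[k:3 * k - 1] and pre not in w[k:min(k + 3, 3 * k)]:
--             return False
--         k //= 3
--     return True
-- ===== Notes on version B (the rewrite author's own statement) =====
-- stated objective: alternative
-- what changed: A's tail recursion on ever-shorter prefix copies is replaced by an upfront power-of-3 length check (repeated division) followed by a single index loop that checks each level's prefix against slices of the original string, never recursing or reassigning the string.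
import Mathlib
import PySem

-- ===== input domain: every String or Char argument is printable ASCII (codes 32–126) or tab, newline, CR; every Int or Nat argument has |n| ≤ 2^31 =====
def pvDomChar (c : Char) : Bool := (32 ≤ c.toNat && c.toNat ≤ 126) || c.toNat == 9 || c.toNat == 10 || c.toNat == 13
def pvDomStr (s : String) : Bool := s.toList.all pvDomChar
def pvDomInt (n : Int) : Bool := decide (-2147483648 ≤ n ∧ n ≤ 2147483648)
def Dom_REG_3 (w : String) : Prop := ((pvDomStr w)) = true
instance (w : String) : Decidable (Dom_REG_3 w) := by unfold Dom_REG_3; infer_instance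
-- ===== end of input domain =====

-- B replaces A's tail recursion on ever-shorter prefixes by a power-of-3 length precheck
-- plus one index loop over levels of the ORIGINAL string (alternative decomposition; same cost).

-- ===== PORT A =====
-- literal transliteration of A: recursion on the first third of the string
def REG_3core (w : List Char) : Option Bool :=
  let n : Nat := w.length
  if n = 1 then some true
  else if n > 1 ∧ n % 3 ≠ 0 then some false
  else if h : n > 1 ∧ n % 3 = 0 then
    let w1 := PySem.List.slice w (some (0 : Int)) (some ((n / 3 : Nat) : Int))
    let w2 := PySem.List.slice w (some ((n / 3 : Nat) : Int)) (some ((n / 3 + 3 : Nat) : Int))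
    let w3 := PySem.List.slice w (some ((n / 3 : Nat) : Int)) (some (-1 : Int))
    if ¬ PySem.Chars.isIn w1 w3 ∧ ¬ PySem.Chars.isIn w1 w2 then some false
    else REG_3core w1
  else none
termination_by w.length
decreasing_by
  rw [PySem.List.slice_zero_start, PySem.List.slice_to_natCast, List.length_take]
  omega

def REG_3 (w : String) : Option Bool := REG_3core w.toList

-- ===== PORT B =====
-- B's while `m % 3 == 0: m //= 3` loop (the `0 < m` conjunct is a totality guard:
-- B only enters the loop with m ≥ 1)
def pvRed3 (m : Nat) : Nat :=
  if m % 3 = 0 ∧ 0 < m then pvRed3 (m / 3) else m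
termination_by m
decreasing_by omega

-- B's `while k >= 1` level loop over the original string
def pvLevels (w : List Char) (k : Nat) : Option Bool :=
  if 1 ≤ k then
    let pre := PySem.List.slice w none (some (k : Int))
    let s3 := PySem.List.slice w (some (k : Int)) (some ((3 * k - 1 : Nat) : Int))
    let s2 := PySem.List.slice w (some (k : Int)) (some ((min (k + 3) (3 * k) : Nat) : Int))
    if ¬ PySem.Chars.isIn pre s3 ∧ ¬ PySem.Chars.isIn pre s2 then some false
    else pvLevels w (k / 3)
  else some true
termination_by k
decreasing_by omega

def REG_3_altCore (w : List Char) : Option Bool :=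
  let n : Nat := w.length
  if n = 0 then none
  else if pvRed3 n ≠ 1 then some false
  else pvLevels w (n / 3)

def REG_3_alt (w : String) : Option Bool := REG_3_altCore w.toList

-- ===== PRECONDITION & SPEC =====
def Spec_REG_3 (w : String) (out : Option Bool) : Prop := out = REG_3_alt w
instance (w : String) (out : Option Bool) : Decidable (Spec_REG_3 w out) := by unfold Spec_REG_3; infer_instance

-- ===== CLAIM (what is proved, stated in full; the proofs are below) =====
def Claim_equal_REG_3 : Prop := ∀ (w : String), Dom_REG_3 w → Spec_REG_3 w (REG_3 w)

-- ===== LEMMAS AND PROOFS =====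

lemma pvRed3_step (m : Nat) (h3 : m % 3 = 0) (h0 : 0 < m) : pvRed3 m = pvRed3 (m / 3) := by
  rw [pvRed3]; simp [h3, h0]

lemma pvRed3_stop (m : Nat) (h3 : m % 3 ≠ 0) : pvRed3 m = m := by
  rw [pvRed3]; simp [h3]

lemma pvRed3_one : pvRed3 1 = 1 := pvRed3_stop 1 (by decide)

-- a slice that stays inside the first k characters ignores a `take k`
lemma slice_take (w : List Char) (k a b : Nat) (hb : b ≤ k) :
    PySem.List.slice (w.take k) (some (a : Int)) (some (b : Int))
      = PySem.List.slice w (some (a : Int)) (some (b : Int)) := by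
  rw [PySem.List.slice_natCast, PySem.List.slice_natCast, List.drop_take, List.take_take]
  congr 1
  omega

lemma take_take_of_le (w : List Char) (k b : Nat) (hb : b ≤ k) :
    PySem.List.slice (w.take k) none (some (b : Int))
      = PySem.List.slice w none (some (b : Int)) := by
  rw [PySem.List.slice_to_natCast, PySem.List.slice_to_natCast, List.take_take,
    Nat.min_eq_left hb]

-- the level loop only looks at the first 3*k characters
lemma pvLevels_take (w : List Char) (k : Nat) :
    ∀ j, 3 * j ≤ k → pvLevels (w.take k) j = pvLevels w j := by
  intro j
  induction j using Nat.strong_induction_on with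
  | _ j ih =>
    intro hj
    by_cases h1 : 1 ≤ j
    · rw [pvLevels]; conv_rhs => rw [pvLevels]
      simp only [h1, if_true]
      rw [take_take_of_le w k j (by omega),
        slice_take w k j (3 * j - 1) (by omega),
        slice_take w k j (min (j + 3) (3 * j)) (by omega)]
      split
      · rfl
      · exact ih (j / 3) (by omega) (by omega)
    · rw [pvLevels]; conv_rhs => rw [pvLevels]
      simp [h1]

-- A's slice w[k:-1] as a plain take/drop
lemma slice_neg_one (w : List Char) (a : Nat) :
    PySem.List.slice w (some (a : Int)) (some (-1 : Int))
      = (w.drop a).take (w.length - 1 - a) := by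
  simp only [PySem.List.slice, PySem.List.clampIdx]
  have h1 : ¬ ((a : Int) < 0) := by omega
  simp only [h1, if_false, Int.toNat_natCast]
  by_cases h0 : w.length = 0
  · simp [List.drop_eq_nil_of_le, List.eq_nil_of_length_eq_zero h0]
  · have h2 : ((-1 : Int) < 0) := by omega
    have h3 : ¬ ((w.length : Int) + (-1) < 0) := by omega
    simp only [h2, if_true, h3, if_false]
    by_cases ha : a ≤ w.length
    · congr 1
      · omega
      · rw [Nat.min_eq_left ha]
    · rw [List.drop_eq_nil_of_le (by omega)]
      simp
      omega

-- main equivalence on lists, by strong induction on the length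
lemma core_eq : ∀ (N : Nat) (w : List Char), w.length ≤ N → REG_3core w = REG_3_altCore w := by
  intro N
  induction N with
  | zero =>
    intro w hw
    have h0 : w.length = 0 := by omega
    rw [REG_3core, REG_3_altCore]
    simp [h0]
  | succ N ih =>
    intro w hw
    rw [REG_3core, REG_3_altCore]
    by_cases h1 : w.length = 1
    · simp [h1, pvRed3_one, pvLevels]
    · by_cases h2 : w.length > 1 ∧ w.length % 3 ≠ 0
      · rw [if_neg h1, if_pos h2, if_neg (show ¬ w.length = 0 by omega),
          if_pos (show pvRed3 w.length ≠ 1 by rw [pvRed3_stop _ h2.2]; omega)]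
      · by_cases h3 : w.length > 1 ∧ w.length % 3 = 0
        · rw [if_neg h1, if_neg h2, dif_pos h3]
          set n := w.length with hn
          have hk1 : 1 ≤ n / 3 := by omega
          set k := n / 3 with hk
          have hnk : n = 3 * k := by omega
          have hn0 : ¬ (n = 0) := by omega
          have hred : pvRed3 n = pvRed3 k := by
            rw [pvRed3_step n h3.2 (by omega)]
          have hw1 : PySem.List.slice w (some (0 : Int)) (some ((k : Nat) : Int))
              = PySem.List.slice w none (some ((k : Nat) : Int)) := by
            rw [PySem.List.slice_zero_start]
          have hw3 : PySem.List.slice w (some ((k : Nat) : Int)) (some (-1 : Int))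
              = PySem.List.slice w (some ((k : Nat) : Int)) (some ((3 * k - 1 : Nat) : Int)) := by
            rw [slice_neg_one, PySem.List.slice_natCast]
            congr 1
            omega
          have hw2 : PySem.List.slice w (some ((k : Nat) : Int)) (some ((k + 3 : Nat) : Int))
              = PySem.List.slice w (some ((k : Nat) : Int)) (some ((min (k + 3) (3 * k) : Nat) : Int)) := by
            rw [PySem.List.slice_natCast, PySem.List.slice_natCast]
            have hlen : (w.drop k).length = 2 * k := by simp; omega
            have hmin : (w.drop k).take (min (k + 3) (3 * k) - k) = (w.drop k).take (min 3 (2 * k)) := by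
              congr 1; omega
            rw [hmin, ← List.take_take, ← hlen, List.take_length]
            congr 1
            omega
          rw [hw1, hw3, hw2, if_neg hn0]
          set pre := PySem.List.slice w none (some ((k : Nat) : Int)) with hpre
          have hlen1 : pre.length = k := by
            rw [hpre, PySem.List.slice_to_natCast, List.length_take]
            omega
          by_cases hrk : pvRed3 k ≠ 1
          · rw [if_pos (show pvRed3 n ≠ 1 by rw [hred]; exact hrk)]
            by_cases hmem : (¬ PySem.Chars.isIn pre
                  (PySem.List.slice w (some ((k : Nat) : Int)) (some ((3 * k - 1 : Nat) : Int))) = true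
                ∧ ¬ PySem.Chars.isIn pre
                  (PySem.List.slice w (some ((k : Nat) : Int)) (some ((min (k + 3) (3 * k) : Nat) : Int))) = true)
            · rw [if_pos hmem]
            · rw [if_neg hmem, ih pre (by rw [hlen1]; omega), REG_3_altCore]
              rw [hlen1, if_neg (show ¬ (k = 0) by omega), if_pos hrk]
          · rw [if_neg (show ¬ (pvRed3 n ≠ 1) by rw [hred]; exact hrk)]
            conv_rhs => rw [pvLevels]
            rw [if_pos hk1, ← hpre]
            by_cases hmem : (¬ PySem.Chars.isIn pre
                  (PySem.List.slice w (some ((k : Nat) : Int)) (some ((3 * k - 1 : Nat) : Int))) = true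
                ∧ ¬ PySem.Chars.isIn pre
                  (PySem.List.slice w (some ((k : Nat) : Int)) (some ((min (k + 3) (3 * k) : Nat) : Int))) = true)
            · rw [if_pos hmem, if_pos hmem]
            · rw [if_neg hmem, if_neg hmem, ih pre (by rw [hlen1]; omega), REG_3_altCore]
              rw [hlen1, if_neg (show ¬ (k = 0) by omega), if_neg hrk]
              rw [hpre, PySem.List.slice_to_natCast]
              exact pvLevels_take w k (k / 3) (by omega)
        · have h0 : w.length = 0 := by omega
          rw [if_neg h1, if_neg h2, dif_neg h3, if_pos h0]

-- ===== VERDICT (by name: the statement is the Claim_ definition above) =====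
theorem REG_3_spec : Claim_equal_REG_3 := by
  intro w _
  unfold Spec_REG_3 REG_3 REG_3_alt
  exact core_eq w.toList.length w.toList (le_refl _)
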